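-- pv_equiv track=rewrite | github.com/BlueberryDuck/planning-inconsistency-measures | planning_measures/measures.py | _compute_mutex
-- ===== SOURCE A (Python) =====
-- def _compute_mutex(
--     achievable_goals: set[str], coexist_witnesses: set[tuple[str, str]]
-- ) -> tuple[int, int]:
--     """
--     Compute P2 mutex measures.
--
--     A goal pair (g1, g2) is mutex if both are achievable but they
--     never coexist in any reachable state.
--     """
--     mutex_pairs = set()
--     goals_in_mutex = set()
--
--     goals = sorted(achievable_goals)
--     for i, g1 in enumerate(goals):
--         for g2 in goals[i + 1 :]:
--             if (g1, g2) not in coexist_witnesses: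
--                 mutex_pairs.add((g1, g2))
--                 goals_in_mutex.add(g1)
--                 goals_in_mutex.add(g2)
--
--     return len(goals_in_mutex), len(mutex_pairs)
-- ===== SOURCE B (Python) =====
-- def _compute_mutex(achievable_goals, coexist_witnesses):
--     """O(n + m): count coexisting sorted pairs and per-goal partner degrees in
--     one pass over the witnesses; mutex pairs = C(n, 2) minus coexisting pairs,
--     and a goal is in a mutex iff its coexist degree is below n - 1."""
--     n = len(achievable_goals)
--     deg = {}
--     coexisting = 0
--     for a, b in coexist_witnesses:
--         if a < b and a in achievable_goals and b in achievable_goals: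
--             coexisting += 1
--             deg[a] = deg.get(a, 0) + 1
--             deg[b] = deg.get(b, 0) + 1
--     goals_in_mutex = sum(1 for g in achievable_goals if deg.get(g, 0) < n - 1)
--     return goals_in_mutex, n * (n - 1) // 2 - coexisting
-- ===== Notes on version B (the rewrite author's own statement) =====
-- stated objective: faster
-- what changed: Replaces the O(n^2) double loop over all sorted goal pairs by a single pass over the coexist witnesses (counting valid sorted witnesses and per-goal partner degrees in a dict), then mutex pairs = C(n,2) - coexisting and a goal is in a mutex iff its degree < n-1.
import Mathlib
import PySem

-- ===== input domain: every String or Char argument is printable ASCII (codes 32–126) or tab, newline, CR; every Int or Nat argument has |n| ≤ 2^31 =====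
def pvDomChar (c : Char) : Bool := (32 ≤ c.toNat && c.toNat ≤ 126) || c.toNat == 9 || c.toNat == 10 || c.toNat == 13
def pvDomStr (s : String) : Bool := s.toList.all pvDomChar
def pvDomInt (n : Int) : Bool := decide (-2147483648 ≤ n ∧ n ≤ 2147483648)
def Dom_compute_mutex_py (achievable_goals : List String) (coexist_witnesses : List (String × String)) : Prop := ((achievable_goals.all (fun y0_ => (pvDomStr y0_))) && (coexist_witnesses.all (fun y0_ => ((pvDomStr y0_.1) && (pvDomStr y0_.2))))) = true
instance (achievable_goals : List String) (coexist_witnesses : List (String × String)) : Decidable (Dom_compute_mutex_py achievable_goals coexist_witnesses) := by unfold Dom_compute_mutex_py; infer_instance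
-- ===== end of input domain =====

-- B replaces A's O(n^2) double loop over all sorted goal pairs by a single pass over the
-- coexist witnesses (objective: faster): mutex pairs = C(n,2) - #valid witnesses, and a
-- goal is in a mutex iff its witness degree is below n - 1.

-- ===== PORT A =====
def compute_mutex_py (achievable_goals : List String) (coexist_witnesses : List (String × String)) : Int × Int :=
  let goals := PySem.List.sorted achievable_goals (fun x => x) false
  let st := (PySem.List.enumerate goals 0).foldl
    (fun (st : PySem.Set (String × String) × PySem.Set String) ig1 =>
      (PySem.List.slice goals (some (ig1.1 + 1)) none).foldl
        (fun st g2 =>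
          if (ig1.2, g2) ∉ coexist_witnesses then
            (PySem.Set.add st.1 (ig1.2, g2),
             PySem.Set.add (PySem.Set.add st.2 ig1.2) g2)
          else st)
        st)
    (PySem.Set.empty, PySem.Set.empty)
  ((st.2.length : Int), (st.1.length : Int))

-- ===== PORT B =====
def compute_mutex_py_alt (achievable_goals : List String) (coexist_witnesses : List (String × String)) : Int × Int :=
  let n : Int := achievable_goals.length
  let st := coexist_witnesses.foldl
    (fun (st : Int × PySem.Dict String Int) p =>
      if p.1 < p.2 ∧ p.1 ∈ achievable_goals ∧ p.2 ∈ achievable_goals then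
        let d := st.2.insert p.1 (st.2.getD p.1 0 + 1)
        (st.1 + 1, d.insert p.2 (d.getD p.2 0 + 1))
      else st)
    (0, PySem.Dict.empty)
  let gim := achievable_goals.foldl
    (fun (acc : Int) g => if st.2.getD g 0 < n - 1 then acc + 1 else acc) 0
  (gim, PySem.Int.floordiv (n * (n - 1)) 2 - st.1)

-- ===== PRECONDITION & SPEC =====
-- The Python arguments are sets; Pre_ says the lists encode sets: distinct elements.
def Pre_compute_mutex_py (achievable_goals : List String) (coexist_witnesses : List (String × String)) : Prop :=
  achievable_goals.Nodup ∧ coexist_witnesses.Nodup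
instance (achievable_goals : List String) (coexist_witnesses : List (String × String)) : Decidable (Pre_compute_mutex_py achievable_goals coexist_witnesses) := by unfold Pre_compute_mutex_py; infer_instance

def pvWitness_compute_mutex_py : List String × (List (String × String)) := (["a", "b", "c"], [("a", "b")])

def Spec_compute_mutex_py (achievable_goals : List String) (coexist_witnesses : List (String × String)) (out : Int × Int) : Prop := out = compute_mutex_py_alt achievable_goals coexist_witnesses
instance (achievable_goals : List String) (coexist_witnesses : List (String × String)) (out : Int × Int) : Decidable (Spec_compute_mutex_py achievable_goals coexist_witnesses out) := by unfold Spec_compute_mutex_py; infer_instance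

-- ===== CLAIM (what is proved, stated in full; the proofs are below) =====
def Claim_equal_compute_mutex_py : Prop := ∀ (achievable_goals : List String) (coexist_witnesses : List (String × String)), Dom_compute_mutex_py achievable_goals coexist_witnesses → Pre_compute_mutex_py achievable_goals coexist_witnesses → Spec_compute_mutex_py achievable_goals coexist_witnesses (compute_mutex_py achievable_goals coexist_witnesses)

-- ===== LEMMAS AND PROOFS =====

-- the list of sorted index pairs (g_i, g_j), i < j, that A's double loop visits
def pvPairs : List String → List (String × String)
  | [] => []
  | g :: t => t.map (fun h => (g, h)) ++ pvPairs t

-- Bool forms of the predicates the counting argument uses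
def pvNotCo (cw : List (String × String)) (p : String × String) : Bool := decide (p ∉ cw)
def pvValid (ag : List String) (p : String × String) : Bool :=
  decide (p.1 < p.2 ∧ p.1 ∈ ag ∧ p.2 ∈ ag)
def pvInv (g : String) (p : String × String) : Bool := decide (p.1 = g ∨ p.2 = g)

theorem pvLen_eq_of_nodup {α : Type} [DecidableEq α] {l1 l2 : List α} (h1 : l1.Nodup)
    (h2 : l2.Nodup) (h : ∀ x, x ∈ l1 ↔ x ∈ l2) : l1.length = l2.length :=
  ((List.perm_ext_iff_of_nodup h1 h2).2 h).length_eq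

theorem pvCountP_split {α : Type} (l : List α) (q p : α → Bool) :
    l.countP (fun a => q a && p a) + l.countP (fun a => q a && !p a) = l.countP q := by
  induction l with
  | nil => simp
  | cons x t ih =>
    simp only [List.countP_cons]
    cases hq : q x <;> cases hp : p x <;> simp [*] <;> omega

theorem pvPairs_comp {gs : List String} {p : String × String} (hp : p ∈ pvPairs gs) :
    p.1 ∈ gs ∧ p.2 ∈ gs := by
  induction gs with
  | nil => simp [pvPairs] at hp
  | cons x t ih =>
    simp only [pvPairs, List.mem_append, List.mem_map] at hp
    rcases hp with ⟨h, hh, rfl⟩ | hp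
    · simp [hh]
    · have := ih hp; exact ⟨List.mem_cons_of_mem _ this.1, List.mem_cons_of_mem _ this.2⟩

theorem pvPairs_mem_iff {gs : List String} (h : gs.Pairwise (· < ·)) (p : String × String) :
    p ∈ pvPairs gs ↔ p.1 ∈ gs ∧ p.2 ∈ gs ∧ p.1 < p.2 := by
  induction gs with
  | nil => simp [pvPairs]
  | cons x t ih =>
    have hx : ∀ y ∈ t, x < y := fun y hy => List.rel_of_pairwise_cons h hy
    have ht := (List.pairwise_cons.1 h).2
    constructor
    · intro hp
      simp only [pvPairs, List.mem_append, List.mem_map] at hp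
      rcases hp with ⟨h2, hh, rfl⟩ | hp
      · exact ⟨List.mem_cons_self, List.mem_cons_of_mem _ hh, hx _ hh⟩
      · have := (ih ht).1 hp
        exact ⟨List.mem_cons_of_mem _ this.1, List.mem_cons_of_mem _ this.2.1, this.2.2⟩
    · rintro ⟨h1, h2, hlt⟩
      simp only [pvPairs, List.mem_append, List.mem_map]
      rcases List.mem_cons.1 h1 with he1 | h1
      · rcases List.mem_cons.1 h2 with he2 | h2
        · exact absurd hlt (by rw [he1, he2]; exact lt_irrefl _)
        · exact Or.inl ⟨p.2, h2, by rw [← he1]⟩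
      · rcases List.mem_cons.1 h2 with he2 | h2
        · exact absurd (lt_trans hlt (he2 ▸ hx _ h1)) (lt_irrefl _)
        · exact Or.inr ((ih ht).2 ⟨h1, h2, hlt⟩)

theorem pvPairs_nodup {gs : List String} (h : gs.Pairwise (· < ·)) : (pvPairs gs).Nodup := by
  induction gs with
  | nil => exact List.nodup_nil
  | cons x t ih =>
    have hx : ∀ y ∈ t, x < y := fun y hy => List.rel_of_pairwise_cons h hy
    have ht := (List.pairwise_cons.1 h).2
    have hxt : x ∉ t := fun hm => lt_irrefl x (hx x hm)
    have htn : t.Nodup := ht.nodup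
    refine List.Nodup.append (htn.map ?_) (ih ht) ?_
    · intro a b hab
      exact congrArg Prod.snd hab
    · intro p hp1 hp2
      rcases List.mem_map.1 hp1 with ⟨h2, hh, rfl⟩
      exact hxt (pvPairs_comp hp2).1

theorem pvPairs_two_len (gs : List String) :
    2 * (pvPairs gs).length = gs.length * (gs.length - 1) := by
  induction gs with
  | nil => simp [pvPairs]
  | cons x t ih =>
    simp only [pvPairs, List.length_append, List.length_map, List.length_cons,
      Nat.add_sub_cancel]
    rw [Nat.mul_add, ih]
    cases t with
    | nil => rfl
    | cons y t' =>
      simp only [List.length_cons, Nat.add_sub_cancel]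
      ring

theorem pvPairs_countP_inv {gs : List String} (h : gs.Pairwise (· < ·)) {g : String}
    (hg : g ∈ gs) : (pvPairs gs).countP (pvInv g) = gs.length - 1 := by
  induction gs with
  | nil => simp at hg
  | cons x t ih =>
    have hx : ∀ y ∈ t, x < y := fun y hy => List.rel_of_pairwise_cons h hy
    have ht := (List.pairwise_cons.1 h).2
    have hxt : x ∉ t := fun hm => lt_irrefl x (hx x hm)
    simp only [pvPairs, List.countP_append, List.countP_map, List.length_cons,
      Nat.add_sub_cancel]
    rcases List.mem_cons.1 hg with rfl | hgt
    · have h1 : t.countP (pvInv g ∘ fun h => (g, h)) = t.length := by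
        apply List.countP_eq_length.2
        intro a _; simp [pvInv, Function.comp]
      have h2 : (pvPairs t).countP (pvInv g) = 0 := by
        apply List.countP_eq_zero.2
        intro p hp
        have := pvPairs_comp hp
        simp only [pvInv, decide_eq_true_eq]
        rintro (rfl | rfl)
        · exact hxt this.1
        · exact hxt this.2
      rw [h1, h2]
      omega
    · have hgx : ¬ (x = g) := fun he => hxt (he ▸ hgt)
      have h1 : t.countP (pvInv g ∘ fun h => (x, h)) = 1 := by
        have : (pvInv g ∘ fun h => (x, h)) = (fun h => h == g) := by
          funext h2; simp only [pvInv, Function.comp]; rw [Bool.eq_iff_iff]; simp [hgx]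
        rw [this, ← List.count]
        exact List.count_eq_one_of_mem ht.nodup hgt
      rw [h1, ih ht hgt]
      have : t ≠ [] := by rintro rfl; simp at hgt
      have : 1 ≤ t.length := List.length_pos_iff.2 this
      omega

-- A's double loop, flattened: a single fold over pvPairs of the sorted goals
theorem pvA_flatten (cw : List (String × String)) (gs : List String) :
    ∀ (t : List String) (k : Nat)
      (st : PySem.Set (String × String) × PySem.Set String), gs.drop k = t →
    (PySem.List.enumerate t (k : Int)).foldl
      (fun st ig1 =>
        (PySem.List.slice gs (some (ig1.1 + 1)) none).foldl
          (fun st g2 =>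
            if (ig1.2, g2) ∉ cw then
              (PySem.Set.add st.1 (ig1.2, g2),
               PySem.Set.add (PySem.Set.add st.2 ig1.2) g2)
            else st)
          st)
      st
    = (pvPairs t).foldl
        (fun st p =>
          if p ∉ cw then (PySem.Set.add st.1 p, PySem.Set.add (PySem.Set.add st.2 p.1) p.2)
          else st)
        st := by
  intro t
  induction t with
  | nil => intro k st _; simp [PySem.List.enumerate, pvPairs]
  | cons x t' ih =>
    intro k st hdrop
    rw [PySem.List.enumerate_cons, List.foldl_cons]
    have hsl : PySem.List.slice gs (some ((k : Int) + 1)) none = t' := by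
      have : ((k : Int) + 1) = ((k + 1 : Nat) : Int) := by push_cast; ring
      rw [this, PySem.List.slice_from_natCast]
      rw [← List.drop_drop, hdrop]
      rfl
    simp only [hsl]
    have hcast : (k : Int) + 1 = ((k + 1 : Nat) : Int) := by push_cast; ring
    rw [hcast]
    have hdrop' : gs.drop (k + 1) = t' := by
      rw [← List.drop_drop, hdrop]; rfl
    rw [ih (k + 1) _ hdrop']
    rw [show pvPairs (x :: t') = t'.map (fun h => (x, h)) ++ pvPairs t' from rfl,
        List.foldl_append, List.foldl_map]

-- the pair fold, componentwise
theorem pvPairFold (cw : List (String × String)) (l : List (String × String)) :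
    ∀ (s1 : PySem.Set (String × String)) (s2 : PySem.Set String),
    l.foldl
      (fun st p =>
        if p ∉ cw then (PySem.Set.add st.1 p, PySem.Set.add (PySem.Set.add st.2 p.1) p.2)
        else st)
      (s1, s2)
    = (PySem.Set.update s1 (l.filter (pvNotCo cw)),
       PySem.Set.update s2 ((l.filter (pvNotCo cw)).flatMap (fun p => [p.1, p.2]))) := by
  induction l with
  | nil => intro s1 s2; simp [PySem.Set.update]
  | cons p t ih =>
    intro s1 s2
    by_cases hp : p ∈ cw
    · rw [List.foldl_cons, if_neg (not_not_intro hp), ih]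
      simp [pvNotCo, hp]
    · rw [List.foldl_cons, if_pos hp, ih]
      simp [pvNotCo, hp, PySem.Set.update]

-- B's witness fold, componentwise
theorem pvBFold (ag : List String) (l : List (String × String)) :
    ∀ (c : Int) (d : PySem.Dict String Int),
    (l.foldl
      (fun (st : Int × PySem.Dict String Int) p =>
        if p.1 < p.2 ∧ p.1 ∈ ag ∧ p.2 ∈ ag then
          let d := st.2.insert p.1 (st.2.getD p.1 0 + 1)
          (st.1 + 1, d.insert p.2 (d.getD p.2 0 + 1))
        else st)
      (c, d)).1 = c + ((l.filter (pvValid ag)).length : Int)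
    ∧ ∀ g : String,
      (l.foldl
        (fun (st : Int × PySem.Dict String Int) p =>
          if p.1 < p.2 ∧ p.1 ∈ ag ∧ p.2 ∈ ag then
            let d := st.2.insert p.1 (st.2.getD p.1 0 + 1)
            (st.1 + 1, d.insert p.2 (d.getD p.2 0 + 1))
          else st)
        (c, d)).2.getD g 0
      = d.getD g 0 + ((l.filter (pvValid ag)).countP (pvInv g) : Int) := by
  induction l with
  | nil => intro c d; simp
  | cons p t ih =>
    intro c d
    by_cases hp : p.1 < p.2 ∧ p.1 ∈ ag ∧ p.2 ∈ ag
    · have hne : p.2 ≠ p.1 := (ne_of_lt hp.1).symm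
      rw [List.foldl_cons, if_pos hp]
      have hpv : pvValid ag p = true := decide_eq_true hp
      have hfil : (p :: t).filter (pvValid ag) = p :: t.filter (pvValid ag) := by
        simp [hpv]
      obtain ⟨ih1, ih2⟩ := ih (c + 1)
        ((d.insert p.1 (d.getD p.1 0 + 1)).insert p.2
          ((d.insert p.1 (d.getD p.1 0 + 1)).getD p.2 0 + 1))
      have hd2 : (d.insert p.1 (d.getD p.1 0 + 1)).getD p.2 0 = d.getD p.2 0 :=
        PySem.Dict.getD_insert_of_ne _ _ _ hne
      constructor
      · rw [ih1, hfil]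
        simp only [List.length_cons]
        push_cast; ring
      · intro g
        rw [ih2 g, hfil, hd2, PySem.Dict.getD_insert, PySem.Dict.getD_insert]
        simp only [List.countP_cons, pvInv, decide_eq_true_eq]
        by_cases hgb : g = p.2
        · subst hgb
          rw [if_pos rfl, if_pos (Or.inr rfl)]
          push_cast; ring
        · by_cases hga : g = p.1
          · subst hga
            rw [if_neg hgb, if_pos rfl, if_pos (Or.inl rfl)]
            push_cast; ring
          · rw [if_neg hgb, if_neg hga,
              if_neg (by rintro (h | h); exacts [hga h.symm, hgb h.symm])]
            push_cast; ring
    · rw [List.foldl_cons, if_neg hp]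
      have hpv : pvValid ag p = false := decide_eq_false hp
      have hfil : (p :: t).filter (pvValid ag) = t.filter (pvValid ag) := by
        simp [hpv]
      rw [hfil] at *
      exact ih c d

theorem pvGimFold (P : String → Prop) [DecidablePred P] (ag : List String) :
    ∀ c : Int,
    ag.foldl (fun (acc : Int) g => if P g then acc + 1 else acc) c
      = c + (ag.countP (fun g => decide (P g)) : Int) := by
  induction ag with
  | nil => simp
  | cons x t ih =>
    intro c
    by_cases hx : P x
    · simp only [List.foldl_cons, ih, List.countP_cons, decide_eq_true_eq, hx]
      push_cast; ring
    · simp only [List.foldl_cons, ih, List.countP_cons, decide_eq_true_eq, hx]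
      push_cast; ring

-- exchange: kept pairs counted over the sorted-pair list = valid witnesses counted over cw
theorem pvExchange {ag gs : List String} {cw : List (String × String)}
    (hmemiff : ∀ p : String × String, p ∈ pvPairs gs ↔ p.1 < p.2 ∧ p.1 ∈ ag ∧ p.2 ∈ ag)
    (hnodup : (pvPairs gs).Nodup) (hcw : cw.Nodup)
    (q : String × String → Bool) :
    ((pvPairs gs).filter (fun p => decide (p ∈ cw) && q p)).length
      = (cw.filter (fun p => pvValid ag p && q p)).length := by
  apply pvLen_eq_of_nodup (hnodup.filter _) (hcw.filter _)
  intro p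
  simp only [List.mem_filter, Bool.and_eq_true, decide_eq_true_eq, pvValid]
  constructor
  · rintro ⟨hp, hin, hq⟩
    exact ⟨hin, (hmemiff p).1 hp, hq⟩
  · rintro ⟨hin, hv, hq⟩
    exact ⟨(hmemiff p).2 hv, hin, hq⟩

-- ===== VERDICT (by name: the statement is the Claim_ definition above) =====
theorem compute_mutex_py_spec : Claim_equal_compute_mutex_py := by
  intro ag cw _ hpre
  obtain ⟨hnd_ag, hnd_cw⟩ := hpre
  unfold Spec_compute_mutex_py
  -- the sorted goal list and its properties
  have hperm : (PySem.List.sorted ag (fun x => x) false).Perm ag :=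
    PySem.List.sorted_perm ag _ false
  set gs := PySem.List.sorted ag (fun x => x) false with hgs
  have hnd_gs : gs.Nodup := hperm.nodup_iff.2 hnd_ag
  have hlt : gs.Pairwise (· < ·) := by
    have hle : gs.Pairwise (fun a b => a ≤ b) := PySem.List.sorted_pairwise ag _
    exact (hle.and hnd_gs).imp (fun h => lt_of_le_of_ne h.1 h.2)
  have hmem : ∀ x : String, x ∈ gs ↔ x ∈ ag := fun x => hperm.mem_iff
  have hlen : gs.length = ag.length := hperm.length_eq
  have hmemiff : ∀ p : String × String, p ∈ pvPairs gs ↔ p.1 < p.2 ∧ p.1 ∈ ag ∧ p.2 ∈ ag := by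
    intro p
    rw [pvPairs_mem_iff hlt, hmem, hmem]
    tauto
  have hndp : (pvPairs gs).Nodup := pvPairs_nodup hlt
  set L := (pvPairs gs).filter (pvNotCo cw) with hL
  set E := L.flatMap (fun p => [p.1, p.2]) with hE
  -- A's value in closed form
  have hA : compute_mutex_py ag cw
      = (((PySem.Set.ofList E).length : Int), ((PySem.Set.ofList L).length : Int)) := by
    simp only [compute_mutex_py, ← hgs]
    have h0 := pvA_flatten cw gs gs 0 (PySem.Set.empty, PySem.Set.empty) (by simp)
    rw [Nat.cast_zero] at h0
    rw [h0, pvPairFold]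
    simp [PySem.Set.update, PySem.Set.ofList_eq_foldl, PySem.Set.empty, hL, hE]
  -- B's value in closed form
  obtain ⟨hB1, hB2⟩ := pvBFold ag cw 0 PySem.Dict.empty
  have hB : compute_mutex_py_alt ag cw
      = (((ag.countP (fun g =>
            decide ((((cw.filter (pvValid ag)).countP (pvInv g) : Int)) < (ag.length : Int) - 1))) : Int),
         PySem.Int.floordiv ((ag.length : Int) * ((ag.length : Int) - 1)) 2
           - ((cw.filter (pvValid ag)).length : Int)) := by
    simp only [compute_mutex_py_alt]
    rw [pvGimFold (fun g =>
        (cw.foldl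
          (fun (st : Int × PySem.Dict String Int) p =>
            if p.1 < p.2 ∧ p.1 ∈ ag ∧ p.2 ∈ ag then
              let d := st.2.insert p.1 (st.2.getD p.1 0 + 1)
              (st.1 + 1, d.insert p.2 (d.getD p.2 0 + 1))
            else st)
          (0, PySem.Dict.empty)).2.getD g 0 < (ag.length : Int) - 1) ag 0]
    rw [hB1]
    have hc : ag.countP (fun g => decide
          ((cw.foldl
            (fun (st : Int × PySem.Dict String Int) p =>
              if p.1 < p.2 ∧ p.1 ∈ ag ∧ p.2 ∈ ag then
                let d := st.2.insert p.1 (st.2.getD p.1 0 + 1)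
                (st.1 + 1, d.insert p.2 (d.getD p.2 0 + 1))
              else st)
            (0, PySem.Dict.empty)).2.getD g 0 < (ag.length : Int) - 1))
        = ag.countP (fun g =>
            decide ((((cw.filter (pvValid ag)).countP (pvInv g) : Int)) < (ag.length : Int) - 1)) := by
      apply List.countP_congr
      intro g _
      simp only [decide_eq_true_eq]
      rw [hB2 g, PySem.Dict.getD_empty]
      constructor <;> intro h <;> omega
    rw [hc]
    ring_nf
  rw [hA, hB]
  -- the mutex-pair count
  have hfil_len : ∀ (q : String × String → Bool),
      ((pvPairs gs).filter (fun p => decide (p ∈ cw) && q p)).length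
        = (cw.filter (fun p => pvValid ag p && q p)).length :=
    fun q => pvExchange hmemiff hndp hnd_cw q
  have hLnd : L.Nodup := hndp.filter _
  have hlenL : (PySem.Set.ofList L).length = L.length :=
    pvLen_eq_of_nodup (PySem.Set.nodup_ofList (xs := L)) hLnd
      (fun x => PySem.Set.mem_ofList L x)
  have hsplit : (pvPairs gs).countP (fun p => decide (p ∈ cw))
      + (pvPairs gs).countP (fun p => !(decide (p ∈ cw))) = (pvPairs gs).length := by
    have := pvCountP_split (pvPairs gs) (fun _ => true) (fun p => decide (p ∈ cw))
    simpa using this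
  have hvx : (pvPairs gs).countP (fun p => decide (p ∈ cw))
      = (cw.filter (pvValid ag)).length := by
    have h1 := hfil_len (fun _ => true)
    simpa [List.countP_eq_length_filter] using h1
  have h2l := pvPairs_two_len gs
  have hLlen : L.length = (pvPairs gs).countP (fun p => !(decide (p ∈ cw))) := by
    rw [hL, ← List.countP_eq_length_filter]
    apply List.countP_congr
    intro p _
    simp [pvNotCo, decide_not]
  have hfd : PySem.Int.floordiv ((ag.length : Int) * ((ag.length : Int) - 1)) 2
      = ((pvPairs gs).length : Int) := by
    rw [← hlen]
    have hkey : ((gs.length : Int)) * ((gs.length : Int) - 1)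
        = ((2 * (pvPairs gs).length : Nat) : Int) := by
      cases hgl : gs.length with
      | zero =>
        rw [hgl] at h2l
        have hP : (pvPairs gs).length = 0 := by omega
        simp [hP]
      | succ m =>
        rw [h2l, hgl]
        push_cast
        ring
    rw [hkey, PySem.Int.floordiv_eq_ediv_of_pos (by norm_num)]
    omega
  have hsnd : ((PySem.Set.ofList L).length : Int)
      = PySem.Int.floordiv ((ag.length : Int) * ((ag.length : Int) - 1)) 2
        - ((cw.filter (pvValid ag)).length : Int) := by
    rw [hfd, hlenL]
    omega
  -- the goals-in-mutex count
  have hEsub : ∀ x, x ∈ E → x ∈ gs := by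
    intro x hx
    rw [hE] at hx
    rcases List.mem_flatMap.1 hx with ⟨p, hpL, hxp⟩
    have hp : p ∈ pvPairs gs := (List.mem_filter.1 hpL).1
    rw [List.mem_pair] at hxp
    rcases hxp with h | h
    · exact h ▸ (pvPairs_comp hp).1
    · exact h ▸ (pvPairs_comp hp).2
  have hlenE : (PySem.Set.ofList E).length
      = (gs.filter (fun g => decide (g ∈ E))).length := by
    apply pvLen_eq_of_nodup (PySem.Set.nodup_ofList (xs := E)) (hnd_gs.filter _)
    intro x
    rw [PySem.Set.mem_ofList E x, List.mem_filter]
    simp only [decide_eq_true_eq]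
    exact ⟨fun h => ⟨hEsub x h, h⟩, fun h => h.2⟩
  have hfst : ((PySem.Set.ofList E).length : Int)
      = ((ag.countP (fun g =>
          decide ((((cw.filter (pvValid ag)).countP (pvInv g) : Int)) < (ag.length : Int) - 1))) : Int) := by
    rw [hlenE, ← List.countP_eq_length_filter]
    have hcg : gs.countP (fun g => decide (g ∈ E))
        = gs.countP (fun g =>
            decide ((((cw.filter (pvValid ag)).countP (pvInv g) : Int)) < (ag.length : Int) - 1)) := by
      apply List.countP_congr
      intro g hg
      simp only [decide_eq_true_eq]
      have hinv : (pvPairs gs).countP (pvInv g) = gs.length - 1 := pvPairs_countP_inv hlt hg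
      have hsp := pvCountP_split (pvPairs gs) (pvInv g) (fun p => decide (p ∈ cw))
      have hx : (pvPairs gs).countP (fun p => pvInv g p && decide (p ∈ cw))
          = (cw.filter (pvValid ag)).countP (pvInv g) := by
        rw [List.countP_filter]
        have h1 := hfil_len (pvInv g)
        rw [← List.countP_eq_length_filter, ← List.countP_eq_length_filter] at h1
        calc (pvPairs gs).countP (fun p => pvInv g p && decide (p ∈ cw))
            = (pvPairs gs).countP (fun p => decide (p ∈ cw) && pvInv g p) := by
              apply List.countP_congr; intro p _; simp [Bool.and_comm]
          _ = cw.countP (fun p => pvValid ag p && pvInv g p) := h1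
          _ = cw.countP (fun p => pvInv g p && pvValid ag p) := by
              apply List.countP_congr; intro p _; simp [Bool.and_comm]
      have hmemE : g ∈ E ↔ 0 < (pvPairs gs).countP (fun p => pvInv g p && !(decide (p ∈ cw))) := by
        have hLc : L.countP (pvInv g)
            = (pvPairs gs).countP (fun p => pvInv g p && !(decide (p ∈ cw))) := by
          rw [hL, List.countP_filter]
          apply List.countP_congr
          intro p _
          simp [pvNotCo, decide_not]
        rw [← hLc, List.countP_pos_iff]
        rw [hE]
        constructor
        · intro hgE
          rcases List.mem_flatMap.1 hgE with ⟨p, hpL, hxp⟩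
          refine ⟨p, hpL, ?_⟩
          simp only [pvInv, decide_eq_true_eq]
          rw [List.mem_pair] at hxp
          rcases hxp with h | h
          · exact Or.inl h.symm
          · exact Or.inr h.symm
        · rintro ⟨p, hpL, hpi⟩
          apply List.mem_flatMap.2
          refine ⟨p, hpL, ?_⟩
          simp only [pvInv, decide_eq_true_eq] at hpi
          rcases hpi with h | h
          · simp [h]
          · simp [h]
      have hgn : 1 ≤ gs.length := List.length_pos_of_mem hg
      rw [hmemE]
      constructor
      · intro h0
        omega
      · intro hlt2
        omega
    rw [hcg]
    rw [hperm.countP_eq]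
  simp only [Prod.mk.injEq]
  exact ⟨hfst, hsnd⟩
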